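-- pv_equiv track=rewrite | github.com/eulersformula/Lintcode-LeetCode | Reach_Destination.py | reach_destination
-- ===== SOURCE A (Python) =====
-- def reach_destination(sx: int, sy: int, dx: int, dy: int) -> bool:
--     # Write your code here.
--     while dx >= sx and dy >= sy:
--         if sx == dx and sy == dy:
--             return True
--         if dx == dy:
--             return False
--         if dx == sx:
--             return (dy - sy) % dx == 0
--         if dy == sy:
--             return (dx - sx) % dy == 0
--         if dx > dy:
--             dx = dx % dy
--         else:
--             dy = dy % dx
--     return False
-- ===== SOURCE B (Python) =====
-- def reach_destination(sx: int, sy: int, dx: int, dy: int) -> bool: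
--     # Recursive, orientation-normalized: go keeps its pair ordered x >= y by
--     # swapping both the source and destination pairs at each reduction step,
--     # so one modulo site and a merged terminal test replace A's six in-loop branches.
--     def go(a, b, x, y):
--         # invariant: x >= y; asks whether (a, b) can reach (x, y)
--         if x < a or y < b:
--             return False
--         if y == b:
--             return x == a or (x != y and (x - a) % y == 0)
--         if x == y:
--             return False
--         if x == a:
--             return (y - b) % x == 0
--         return go(b, a, y, x % y)
--     return go(sx, sy, dx, dy) if dx >= dy else go(sy, sx, dy, dx)
-- ===== Notes on version B (the rewrite author's own statement) =====
-- stated objective: simpler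
-- what changed: Replaces A's iterative six-branch loop with two symmetric modulo updates by a recursive helper that keeps its pair orientation-normalized (x >= y) by swapping source and destination pairs at each step, leaving a single modulo site and a merged terminal test.
-- outside the precondition, e.g. on reach_destination(0, 0, 3, 3): A returns False, B returns False; on reach_destination(-3, -3, 2, 2): A returns False, B returns False
import Mathlib
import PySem

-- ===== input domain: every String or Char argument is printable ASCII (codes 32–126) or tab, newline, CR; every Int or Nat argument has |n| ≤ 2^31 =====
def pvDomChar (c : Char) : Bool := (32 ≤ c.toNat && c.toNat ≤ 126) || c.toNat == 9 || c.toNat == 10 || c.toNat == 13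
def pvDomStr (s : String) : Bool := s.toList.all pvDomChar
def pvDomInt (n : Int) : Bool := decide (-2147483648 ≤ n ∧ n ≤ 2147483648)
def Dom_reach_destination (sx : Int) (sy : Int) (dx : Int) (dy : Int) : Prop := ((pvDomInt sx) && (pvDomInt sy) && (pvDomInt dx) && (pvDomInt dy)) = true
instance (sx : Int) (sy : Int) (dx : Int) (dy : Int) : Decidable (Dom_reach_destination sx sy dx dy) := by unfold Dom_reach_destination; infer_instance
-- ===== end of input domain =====

-- B: recursive, orientation-normalized (x ≥ y via pair swaps) reformulation of A's
-- six-branch reduction loop — shorter, single modulo site (objective: simpler).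


-- ===== PORT A =====
-- A's while-loop as fueled recursion; the starting fuel (dx+dy).toNat+1 is proved
-- sufficient on Pre_ (each loop iteration strictly decreases dx+dy there).
def reachLoopA (sx : Int) (sy : Int) : Nat → Int → Int → Bool
  | 0, _, _ => false
  | fuel+1, dx, dy =>
    if dx ≥ sx ∧ dy ≥ sy then
      if sx = dx ∧ sy = dy then true
      else if dx = dy then false
      else if dx = sx then decide (PySem.Int.mod (dy - sy) dx = 0)
      else if dy = sy then decide (PySem.Int.mod (dx - sx) dy = 0)
      else if dx > dy then reachLoopA sx sy fuel (PySem.Int.mod dx dy) dy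
      else reachLoopA sx sy fuel dx (PySem.Int.mod dy dx)
    else false

def reach_destination (sx : Int) (sy : Int) (dx : Int) (dy : Int) : Bool :=
  reachLoopA sx sy ((dx + dy).toNat + 1) dx dy

-- ===== PORT B =====
-- B's recursive go as fueled recursion (fuel proved sufficient on Pre_);
-- invariant x ≥ y, both pairs are swapped at the single recursive call.
def reachGo : Nat → Int → Int → Int → Int → Bool
  | 0, _, _, _, _ => false
  | fuel+1, a, b, x, y =>
    if x < a ∨ y < b then false
    else if y = b then decide (x = a) || (decide (x ≠ y) && decide (PySem.Int.mod (x - a) y = 0))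
    else if x = y then false
    else if x = a then decide (PySem.Int.mod (y - b) x = 0)
    else reachGo fuel b a y (PySem.Int.mod x y)

def reach_destination_alt (sx : Int) (sy : Int) (dx : Int) (dy : Int) : Bool :=
  if dx ≥ dy then reachGo ((dx + dy).toNat + 1) sx sy dx dy
  else reachGo ((dx + dy).toNat + 1) sy sx dy dx

-- ===== PRECONDITION & SPEC =====
-- Pre_ excludes inputs where A's loop body runs with a nonpositive source coordinate
-- (sx ≤ 0 or sy ≤ 0 while dx ≥ sx and dy ≥ sy): there A's modulo by a zero or negative
-- value raises ZeroDivisionError or loops forever, and on the few such inputs where A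
-- still returns (an early False) that value is an accident of its branch order.
def Pre_reach_destination (sx : Int) (sy : Int) (dx : Int) (dy : Int) : Prop :=
  dx < sx ∨ dy < sy ∨ (1 ≤ sx ∧ 1 ≤ sy)
instance (sx : Int) (sy : Int) (dx : Int) (dy : Int) : Decidable (Pre_reach_destination sx sy dx dy) := by unfold Pre_reach_destination; infer_instance

def pvWitness_reach_destination : Int × Int × Int × Int := (1, 1, 3, 5)

def Spec_reach_destination (sx : Int) (sy : Int) (dx : Int) (dy : Int) (out : Bool) : Prop := out = reach_destination_alt sx sy dx dy
instance (sx : Int) (sy : Int) (dx : Int) (dy : Int) (out : Bool) : Decidable (Spec_reach_destination sx sy dx dy out) := by unfold Spec_reach_destination; infer_instance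

-- ===== CLAIM (what is proved, stated in full; the proofs are below) =====
def Claim_equal_reach_destination : Prop := ∀ (sx : Int) (sy : Int) (dx : Int) (dy : Int), Dom_reach_destination sx sy dx dy → Pre_reach_destination sx sy dx dy → Spec_reach_destination sx sy dx dy (reach_destination sx sy dx dy)

-- ===== LEMMAS AND PROOFS =====

lemma reachGo_stop (a b x y : Int) (f : Nat) (hf : 0 < f) (h : x < a ∨ y < b) :
    reachGo f a b x y = false := by
  obtain ⟨g, rfl⟩ : ∃ g, f = g + 1 := ⟨f - 1, by omega⟩
  simp only [reachGo, if_pos h]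

lemma stop_case (sx sy dx dy : Int) (f1 f2 : Nat) (h1 : 0 < f1) (h2 : 0 < f2)
    (hg : ¬ (dx ≥ sx ∧ dy ≥ sy)) :
    reachLoopA sx sy f1 dx dy
      = (if dy ≤ dx then reachGo f2 sx sy dx dy else reachGo f2 sy sx dy dx) := by
  obtain ⟨a, rfl⟩ : ∃ a, f1 = a + 1 := ⟨f1 - 1, by omega⟩
  have hA : reachLoopA sx sy (a + 1) dx dy = false := by
    simp only [reachLoopA, if_neg hg]
  rw [hA]
  split_ifs with hor
  · exact (reachGo_stop sx sy dx dy f2 h2 (by omega)).symm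
  · exact (reachGo_stop sy sx dy dx f2 h2 (by omega)).symm

lemma key (n : Nat) : ∀ (sx sy dx dy : Int) (f1 f2 : Nat), 1 ≤ sx → 1 ≤ sy →
    (dx + dy).toNat ≤ n → (dx + dy).toNat < f1 → (dx + dy).toNat < f2 →
    reachLoopA sx sy f1 dx dy
      = (if dy ≤ dx then reachGo f2 sx sy dx dy else reachGo f2 sy sx dy dx) := by
  induction n with
  | zero =>
    intro sx sy dx dy f1 f2 hsx hsy hn h1 h2
    exact stop_case sx sy dx dy f1 f2 (by omega) (by omega) (by omega)
  | succ n ih =>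
    intro sx sy dx dy f1 f2 hsx hsy hn h1 h2
    by_cases hg : dx ≥ sx ∧ dy ≥ sy
    · obtain ⟨hgx, hgy⟩ := hg
      obtain ⟨a, rfl⟩ : ∃ a, f1 = a + 1 := ⟨f1 - 1, by omega⟩
      obtain ⟨c, rfl⟩ : ∃ c, f2 = c + 1 := ⟨f2 - 1, by omega⟩
      have hA1 : reachLoopA sx sy (a + 1) dx dy
          = (if sx = dx ∧ sy = dy then true
             else if dx = dy then false
             else if dx = sx then decide (PySem.Int.mod (dy - sy) dx = 0)
             else if dy = sy then decide (PySem.Int.mod (dx - sx) dy = 0)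
             else if dx > dy then reachLoopA sx sy a (PySem.Int.mod dx dy) dy
             else reachLoopA sx sy a dx (PySem.Int.mod dy dx)) := by
        simp only [reachLoopA]
        rw [if_pos (⟨hgx, hgy⟩ : dx ≥ sx ∧ dy ≥ sy)]
      by_cases hor : dy ≤ dx
      · -- oriented call reachGo (c+1) sx sy dx dy ; x = dx, y = dy, a = sx, b = sy
        rw [if_pos hor, hA1]
        have hB1 : reachGo (c + 1) sx sy dx dy
            = (if dy = sy then decide (dx = sx) || (decide (dx ≠ dy) && decide (PySem.Int.mod (dx - sx) dy = 0))
               else if dx = dy then false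
               else if dx = sx then decide (PySem.Int.mod (dy - sy) dx = 0)
               else reachGo c sy sx dy (PySem.Int.mod dx dy)) := by
          simp only [reachGo]
          rw [if_neg (by omega : ¬ (dx < sx ∨ dy < sy))]
        rw [hB1]
        by_cases hyb : dy = sy
        · by_cases hxa : dx = sx
          · rw [if_pos (⟨hxa.symm, hyb.symm⟩ : sx = dx ∧ sy = dy), if_pos hyb]
            simp [hxa]
          · by_cases heq : dx = dy
            · rw [if_neg (fun h => hxa h.1.symm), if_pos heq, if_pos hyb]
              simp [heq]
              omega
            · rw [if_neg (fun h => hxa h.1.symm), if_neg heq, if_neg hxa,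
                  if_pos hyb, if_pos hyb]
              simp [hxa, heq]
        · by_cases heq : dx = dy
          · rw [if_neg (fun h => hyb h.2.symm), if_pos heq, if_neg hyb, if_pos heq]
          · by_cases hxa : dx = sx
            · rw [if_neg (fun h => hyb h.2.symm), if_neg heq, if_pos hxa,
                  if_neg hyb, if_neg heq, if_pos hxa]
            · -- recursive step: dx > dy > sy ≥ 1
              rw [if_neg (fun h => hyb h.2.symm), if_neg heq, if_neg hxa, if_neg hyb,
                  if_pos (by omega : dx > dy), if_neg hyb, if_neg heq, if_neg hxa]
              have hdy0 : (0 : Int) < dy := by omega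
              have hme : PySem.Int.mod dx dy = dx % dy := PySem.Int.mod_eq_emod_of_pos hdy0
              have hb1 : 0 ≤ dx % dy := Int.emod_nonneg _ (by omega)
              have hb2 : dx % dy < dy := Int.emod_lt_of_pos _ hdy0
              rw [hme]
              have hih := ih sx sy (dx % dy) dy a c hsx hsy (by omega) (by omega) (by omega)
              rw [hih, if_neg (by omega : ¬ dy ≤ dx % dy)]
      · -- swapped call reachGo (c+1) sy sx dy dx ; x = dy, y = dx, a = sy, b = sx
        rw [if_neg hor, hA1]
        have hB1 : reachGo (c + 1) sy sx dy dx
            = (if dx = sx then decide (dy = sy) || (decide (dy ≠ dx) && decide (PySem.Int.mod (dy - sy) dx = 0))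
               else if dy = dx then false
               else if dy = sy then decide (PySem.Int.mod (dx - sx) dy = 0)
               else reachGo c sx sy dx (PySem.Int.mod dy dx)) := by
          simp only [reachGo]
          rw [if_neg (by omega : ¬ (dy < sy ∨ dx < sx))]
        rw [hB1]
        have heq : ¬ dx = dy := by omega
        have heq' : ¬ dy = dx := by omega
        by_cases hxa : dx = sx
        · by_cases hyb : dy = sy
          · rw [if_pos (⟨hxa.symm, hyb.symm⟩ : sx = dx ∧ sy = dy), if_pos hxa]
            simp [hyb]
          · rw [if_neg (fun h => hyb h.2.symm), if_neg heq, if_pos hxa, if_pos hxa]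
            simp [hyb, heq']
        · by_cases hyb : dy = sy
          · rw [if_neg (fun h => hxa h.1.symm), if_neg heq, if_neg hxa, if_pos hyb,
                if_neg hxa, if_neg heq', if_pos hyb]
          · -- recursive step: dy > dx > sx ≥ 1
            rw [if_neg (fun h => hxa h.1.symm), if_neg heq, if_neg hxa, if_neg hyb,
                if_neg (by omega : ¬ dx > dy), if_neg hxa, if_neg heq', if_neg hyb]
            have hdx0 : (0 : Int) < dx := by omega
            have hme : PySem.Int.mod dy dx = dy % dx := PySem.Int.mod_eq_emod_of_pos hdx0
            have hb1 : 0 ≤ dy % dx := Int.emod_nonneg _ (by omega)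
            have hb2 : dy % dx < dx := Int.emod_lt_of_pos _ hdx0
            rw [hme]
            have hih := ih sx sy dx (dy % dx) a c hsx hsy (by omega) (by omega) (by omega)
            rw [hih, if_pos (by omega : dy % dx ≤ dx)]
    · exact stop_case sx sy dx dy _ _ (by omega) (by omega) hg

-- ===== VERDICT (by name: the statement is the Claim_ definition above) =====
theorem reach_destination_spec : Claim_equal_reach_destination := by
  intro sx sy dx dy _hdom hpre
  unfold Spec_reach_destination reach_destination reach_destination_alt
  have hfin : reachLoopA sx sy ((dx + dy).toNat + 1) dx dy
      = (if dy ≤ dx then reachGo ((dx + dy).toNat + 1) sx sy dx dy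
         else reachGo ((dx + dy).toNat + 1) sy sx dy dx) := by
    rcases hpre with h | h | ⟨hsx, hsy⟩
    · exact stop_case sx sy dx dy _ _ (by omega) (by omega) (by omega)
    · exact stop_case sx sy dx dy _ _ (by omega) (by omega) (by omega)
    · exact key (dx + dy).toNat sx sy dx dy _ _ hsx hsy le_rfl (by omega) (by omega)
  rw [hfin]
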